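-- pv_equiv track=rewrite | github.com/rhsCZ/unsloth | scripts/notebook_validator.py | _diff_oracle
-- ===== SOURCE A (Python) =====
-- def _diff_oracle(
--     upstream: dict[str, str], snapshot: dict[str, str]
-- ) -> tuple[list[tuple[str, str]], list[tuple[str, str]], list[tuple[str, str, str]]]:
--     """Return (new, removed, changed). new/removed are (key, value);
--     changed is (key, old, new)."""
--     new = sorted((k, upstream[k]) for k in upstream.keys() - snapshot.keys())
--     removed = sorted((k, snapshot[k]) for k in snapshot.keys() - upstream.keys())
--     changed = sorted(
--         (k, snapshot[k], upstream[k])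
--         for k in upstream.keys() & snapshot.keys()
--         if upstream[k] != snapshot[k]
--     )
--     return new, removed, changed
-- ===== SOURCE B (Python) =====
-- def _diff_oracle(
--     upstream: dict[str, str], snapshot: dict[str, str]
-- ) -> tuple[list[tuple[str, str]], list[tuple[str, str]], list[tuple[str, str, str]]]:
--     """Return (new, removed, changed). new/removed are (key, value);
--     changed is (key, old, new).
--
--     Sort-then-merge: sort both item lists by key once, then a single
--     two-pointer merge emits new/removed/changed already in sorted order."""
--     us = sorted(upstream.items(), key=lambda p: p[0])
--     ss = sorted(snapshot.items(), key=lambda p: p[0])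
--     new, removed, changed = [], [], []
--     i = j = 0
--     while i < len(us) and j < len(ss):
--         ku, vu = us[i]
--         ks, vs = ss[j]
--         if ku < ks:
--             new.append((ku, vu))
--             i += 1
--         elif ks < ku:
--             removed.append((ks, vs))
--             j += 1
--         else:
--             if vs != vu:
--                 changed.append((ku, vs, vu))
--             i += 1
--             j += 1
--     new.extend(us[i:])
--     removed.extend(ss[j:])
--     return new, removed, changed
-- ===== Notes on version B (the rewrite author's own statement) =====
-- stated objective: alternative
-- what changed: Replaces the three set-algebra passes (key-set difference, reverse difference, intersection with a filtered comprehension, each followed by a sort) by sort-then-merge: both item lists are sorted by key once and a single two-pointer merge emits new, removed and changed already in sorted order.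
import Mathlib
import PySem

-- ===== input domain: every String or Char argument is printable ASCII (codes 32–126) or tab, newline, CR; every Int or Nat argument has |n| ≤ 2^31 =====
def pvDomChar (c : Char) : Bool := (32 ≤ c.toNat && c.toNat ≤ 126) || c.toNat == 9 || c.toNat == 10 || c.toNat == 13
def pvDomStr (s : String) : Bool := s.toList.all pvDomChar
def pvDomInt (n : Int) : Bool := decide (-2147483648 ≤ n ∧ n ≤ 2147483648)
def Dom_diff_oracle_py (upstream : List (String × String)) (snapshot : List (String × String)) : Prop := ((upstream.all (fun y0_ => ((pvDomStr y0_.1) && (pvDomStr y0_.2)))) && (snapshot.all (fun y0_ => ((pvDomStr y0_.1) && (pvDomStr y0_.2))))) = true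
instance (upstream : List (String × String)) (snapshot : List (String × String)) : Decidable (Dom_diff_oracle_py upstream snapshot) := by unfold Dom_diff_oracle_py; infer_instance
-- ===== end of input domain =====

-- B replaces A's three set-algebra passes by sort-then-merge: both item lists are
-- sorted by key once and a single two-pointer merge emits new/removed/changed
-- already in sorted order (objective: alternative algorithm, same asymptotic cost).
-- Dict arguments are association lists, normalised as Python's dict() does (PySem.Dict.ofList).
-- A dict's keys are Nodup, so Python's lexicographic tuple sort coincides with the
-- sort keyed by the first component, which is how port A renders its `sorted` calls.

-- ===== PORT A =====
def diff_oracle_py (upstream : List (String × String)) (snapshot : List (String × String)) : (List (String × String)) × (List (String × String)) × (List (String × String × String)) :=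
  let dU := PySem.Dict.ofList upstream
  let dS := PySem.Dict.ofList snapshot
  -- new = sorted((k, upstream[k]) for k in upstream.keys() - snapshot.keys())
  -- (the set-iteration order is irrelevant under sorted, so the difference is taken over items)
  let new := PySem.List.sorted (dU.items.filter (fun p => !(dS.contains p.1))) (fun p => p.1) false
  -- removed = sorted((k, snapshot[k]) for k in snapshot.keys() - upstream.keys())
  let removed := PySem.List.sorted (dS.items.filter (fun p => !(dU.contains p.1))) (fun p => p.1) false
  -- changed = sorted((k, snapshot[k], upstream[k]) for k in upstream.keys() & snapshot.keys() if upstream[k] != snapshot[k])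
  let changed := PySem.List.sorted
    (dU.items.filterMap (fun p =>
      match dS.get? p.1 with
      | some w => if w != p.2 then some (p.1, w, p.2) else none
      | none => none)) (fun p => p.1) false
  (new, removed, changed)

-- ===== PORT B =====
-- the two-pointer while loop of Source B, as a recursion over the two (key-)sorted lists;
-- trailing tails are flushed exactly as Source B's final extends do
def pvMerge : List (String × String) → List (String × String) →
    (List (String × String)) × (List (String × String)) × (List (String × String × String))
  | [], ss => ([], ss, [])
  | u :: us, [] => (u :: us, [], [])
  | u :: us, s :: ss =>
    if u.1 < s.1 then
      let r := pvMerge us (s :: ss)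
      (u :: r.1, r.2.1, r.2.2)
    else if s.1 < u.1 then
      let r := pvMerge (u :: us) ss
      (r.1, s :: r.2.1, r.2.2)
    else
      let r := pvMerge us ss
      (r.1, r.2.1, if s.2 != u.2 then (u.1, s.2, u.2) :: r.2.2 else r.2.2)
  termination_by us ss => us.length + ss.length
  decreasing_by all_goals simp <;> omega

def diff_oracle_py_alt (upstream : List (String × String)) (snapshot : List (String × String)) : (List (String × String)) × (List (String × String)) × (List (String × String × String)) :=
  let us := PySem.List.sorted (PySem.Dict.ofList upstream).items (fun p => p.1) false
  let ss := PySem.List.sorted (PySem.Dict.ofList snapshot).items (fun p => p.1) false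
  pvMerge us ss

-- ===== PRECONDITION & SPEC =====
def Spec_diff_oracle_py (upstream : List (String × String)) (snapshot : List (String × String)) (out : (List (String × String)) × (List (String × String)) × (List (String × String × String))) : Prop := out = diff_oracle_py_alt upstream snapshot
instance (upstream : List (String × String)) (snapshot : List (String × String)) (out : (List (String × String)) × (List (String × String)) × (List (String × String × String))) : Decidable (Spec_diff_oracle_py upstream snapshot out) := by unfold Spec_diff_oracle_py; infer_instance

-- ===== CLAIM (what is proved, stated in full; the proofs are below) =====
def Claim_equal_diff_oracle_py : Prop := ∀ (upstream : List (String × String)) (snapshot : List (String × String)), Dom_diff_oracle_py upstream snapshot → Spec_diff_oracle_py upstream snapshot (diff_oracle_py upstream snapshot)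

-- ===== LEMMAS AND PROOFS =====

/-- The merge of two strictly key-increasing lists is (in one pass) the left-only
elements, the right-only elements, and the changed triples. -/
theorem pvMerge_eq : ∀ (us ss : List (String × String)),
    us.Pairwise (fun a b => a.1 < b.1) → ss.Pairwise (fun a b => a.1 < b.1) →
    pvMerge us ss =
      (us.filter (fun p => !(ss.any (fun q => q.1 == p.1))),
       ss.filter (fun p => !(us.any (fun q => q.1 == p.1))),
       us.filterMap (fun p =>
         match ss.find? (fun q => q.1 == p.1) with
         | some q => if q.2 != p.2 then some (p.1, q.2, p.2) else none
         | none => none)) := by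
  intro us ss
  induction us, ss using pvMerge.induct with
  | case1 ss =>
    intro _ _
    simp [pvMerge]
  | case2 u us =>
    intro _ _
    simp [pvMerge]
  | case3 u us s ss h1 ih =>
    intro hu hs
    have hne : ∀ q ∈ s :: ss, (q.1 == u.1) = false := by
      intro q hq
      rcases List.mem_cons.mp hq with rfl | hq'
      · exact beq_eq_false_iff_ne.mpr (fun e => absurd (e ▸ h1) (lt_irrefl _))
      · have hlt := (List.pairwise_cons.mp hs).1 q hq'
        exact beq_eq_false_iff_ne.mpr (fun e => absurd (e ▸ (h1.trans hlt)) (lt_irrefl _))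
    have hany : ((s :: ss).any (fun q => q.1 == u.1)) = false :=
      List.any_eq_false.mpr (fun q hq => by simp [hne q hq])
    have hfind : (s :: ss).find? (fun q => q.1 == u.1) = none :=
      List.find?_eq_none.mpr (fun q hq => by simp [hne q hq])
    rw [pvMerge]
    simp only [if_pos h1]
    rw [ih (List.Pairwise.of_cons hu) hs]
    refine Prod.ext ?_ (Prod.ext ?_ ?_) <;> dsimp only
    · rw [List.filter_cons_of_pos (by simp [hany])]
    · refine List.filter_congr (fun q hq => ?_)
      have hf : (u.1 == q.1) = false :=
        beq_eq_false_iff_ne.mpr (fun e => (beq_eq_false_iff_ne.mp (hne q hq)) e.symm)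
      simp [List.any_cons, hf]
    · rw [List.filterMap_cons]
      simp only [hfind]
  | case4 u us s ss h1 h2 ih =>
    intro hu hs
    have hne : ∀ q ∈ u :: us, (q.1 == s.1) = false := by
      intro q hq
      rcases List.mem_cons.mp hq with rfl | hq'
      · exact beq_eq_false_iff_ne.mpr (fun e => absurd (e ▸ h2) (lt_irrefl _))
      · have hlt := (List.pairwise_cons.mp hu).1 q hq'
        exact beq_eq_false_iff_ne.mpr (fun e => absurd (e ▸ (h2.trans hlt)) (lt_irrefl _))
    have hany : ((u :: us).any (fun q => q.1 == s.1)) = false :=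
      List.any_eq_false.mpr (fun q hq => by simp [hne q hq])
    rw [pvMerge]
    simp only [if_neg h1, if_pos h2]
    rw [ih hu (List.Pairwise.of_cons hs)]
    refine Prod.ext ?_ (Prod.ext ?_ ?_) <;> dsimp only
    · refine List.filter_congr (fun q hq => ?_)
      have hf : (s.1 == q.1) = false :=
        beq_eq_false_iff_ne.mpr (fun e => (beq_eq_false_iff_ne.mp (hne q hq)) e.symm)
      simp [List.any_cons, hf]
    · rw [List.filter_cons_of_pos (by simp [hany])]
    · refine List.filterMap_congr (fun p hp => ?_)
      have hf : (s.1 == p.1) = false :=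
        beq_eq_false_iff_ne.mpr (fun e => (beq_eq_false_iff_ne.mp (hne p hp)) e.symm)
      rw [List.find?_cons_of_neg (by simp [hf])]
  | case5 u us s ss h1 h2 ih =>
    intro hu hs
    have heq : u.1 = s.1 := le_antisymm (not_lt.mp h2) (not_lt.mp h1)
    have hgtU : ∀ q ∈ us, u.1 < q.1 := (List.pairwise_cons.mp hu).1
    have hgtS : ∀ q ∈ ss, s.1 < q.1 := (List.pairwise_cons.mp hs).1
    rw [pvMerge]
    simp only [if_neg h1, if_neg h2]
    rw [ih (List.Pairwise.of_cons hu) (List.Pairwise.of_cons hs)]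
    refine Prod.ext ?_ (Prod.ext ?_ ?_) <;> dsimp only
    · rw [List.filter_cons_of_neg (by simp [List.any_cons, heq.symm])]
      refine List.filter_congr (fun q hq => ?_)
      have hf : (s.1 == q.1) = false :=
        beq_eq_false_iff_ne.mpr (fun e => absurd (heq ▸ e ▸ hgtU q hq) (lt_irrefl _))
      simp [List.any_cons, hf]
    · rw [List.filter_cons_of_neg (by simp [List.any_cons, heq])]
      refine List.filter_congr (fun q hq => ?_)
      have hf : (u.1 == q.1) = false :=
        beq_eq_false_iff_ne.mpr (fun e => absurd (heq.symm ▸ e ▸ hgtS q hq) (lt_irrefl _))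
      simp [List.any_cons, hf]
    · rw [List.filterMap_cons]
      have hfind : (s :: ss).find? (fun q => q.1 == u.1) = some s :=
        List.find?_cons_of_pos (by simp [heq.symm]) (l := ss)
      simp only [hfind]
      have htail : ∀ p ∈ us,
          (match (s :: ss).find? (fun q => q.1 == p.1) with
           | some q => if (q.2 != p.2) = true then some (p.1, q.2, p.2) else none
           | none => none)
          = (match ss.find? (fun q => q.1 == p.1) with
             | some q => if (q.2 != p.2) = true then some (p.1, q.2, p.2) else none
             | none => none) := by
        intro p hp
        have hf : (s.1 == p.1) = false :=
          beq_eq_false_iff_ne.mpr (fun e => absurd (heq ▸ e ▸ hgtU p hp) (lt_irrefl _))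
        rw [List.find?_cons_of_neg (by simp [hf])]
      rw [List.filterMap_congr htail]
      by_cases hv : (s.2 != u.2) = true
      · simp [hv]
      · simp only [Bool.not_eq_true] at hv
        simp [hv]

/-- Scanning a permutation of a Nodup-keyed dict's items for a key is `contains`. -/
theorem pv_any_eq_contains (d : PySem.Dict String String) (l : List (String × String))
    (hp : l.Perm d.items) (k : String) :
    l.any (fun q => q.1 == k) = d.contains k := by
  rw [PySem.Dict.contains_eq_decide_mem_keys]
  by_cases hk : k ∈ d.keys
  · obtain ⟨q, hq, he⟩ := List.mem_map.mp hk
    simp only [hk, decide_true, List.any_eq_true]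
    exact ⟨q, hp.mem_iff.mpr hq, by simpa using he⟩
  · simp only [hk, decide_false, List.any_eq_false]
    intro q hq
    have hmem : q.1 ∈ d.keys := PySem.Dict.mem_keys_of_mem_items d (hp.mem_iff.mp hq)
    simpa using fun (e : q.1 = k) => hk (e ▸ hmem)

/-- First match by key in a permutation of a Nodup-keyed dict's items is `get?`. -/
theorem pv_find?_eq_get? (d : PySem.Dict String String) (l : List (String × String))
    (hp : l.Perm d.items) (hnd : d.keys.Nodup) (k : String) :
    l.find? (fun q => q.1 == k) = (d.get? k).map (fun w => (k, w)) := by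
  rcases hg : d.get? k with _ | w
  · simp only [Option.map_none]
    rw [List.find?_eq_none]
    intro q hq
    have hmem : q.1 ∈ d.keys := PySem.Dict.mem_keys_of_mem_items d (hp.mem_iff.mp hq)
    have hnk : k ∉ d.keys := (PySem.Dict.get?_eq_none_iff_not_mem_keys d k).mp hg
    simpa using fun (e : q.1 = k) => hnk (e ▸ hmem)
  · have hm : (k, w) ∈ l := hp.mem_iff.mpr (PySem.Dict.mem_items_of_get?_eq_some d hg)
    rcases hf : l.find? (fun q => q.1 == k) with _ | q
    · have := List.find?_eq_none.mp hf (k, w) hm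
      simp at this
    · have hq1 : q.1 = k := by simpa using List.find?_some hf
      have hqm : (q.1, q.2) ∈ d.items := by
        simpa using hp.mem_iff.mp (List.mem_of_find?_eq_some hf)
      have hg2 := PySem.Dict.get?_of_mem_items d hqm hnd
      rw [hq1, hg] at hg2
      have hw : q.2 = w := (Option.some_inj.mp hg2).symm
      rw [hf]
      simp only [Option.map_some]
      exact congrArg some (Prod.ext hq1 hw)

-- ===== VERDICT (by name: the statement is the Claim_ definition above) =====
/-- Strict key-sortedness of `sorted d.items (·.1)` for a Nodup-keyed dict. -/
theorem pv_sorted_items_strict (d : PySem.Dict String String) (hnd : d.keys.Nodup) :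
    (PySem.List.sorted d.items (fun p => p.1) false).Pairwise (fun a b => a.1 < b.1) := by
  have hperm : (PySem.List.sorted d.items (fun p => p.1) false).Perm d.items :=
    PySem.List.sorted_perm d.items (fun p => p.1) false
  have hle : (PySem.List.sorted d.items (fun p => p.1) false).Pairwise
      (fun a b => a.1 ≤ b.1) := PySem.List.sorted_pairwise d.items (fun p => p.1)
  have hndm : ((PySem.List.sorted d.items (fun p => p.1) false).map (fun p => p.1)).Nodup :=
    ((hperm.map (fun p : String × String => p.1)).nodup_iff).mpr hnd
  have hne : (PySem.List.sorted d.items (fun p => p.1) false).Pairwise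
      (fun a b => a.1 ≠ b.1) := List.pairwise_map.mp hndm
  exact (hle.and hne).imp (fun h => lt_of_le_of_ne h.1 h.2)

-- ===== VERDICT (by name: the statement is the Claim_ definition above) =====
theorem diff_oracle_py_spec : Claim_equal_diff_oracle_py := by
  intro upstream snapshot _
  unfold Spec_diff_oracle_py diff_oracle_py diff_oracle_py_alt
  dsimp only
  set dU := PySem.Dict.ofList upstream with hdU
  set dS := PySem.Dict.ofList snapshot with hdS
  set us := PySem.List.sorted dU.items (fun p => p.1) false with hus
  set ss := PySem.List.sorted dS.items (fun p => p.1) false with hss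
  have hndU : dU.keys.Nodup := PySem.Dict.nodup_keys_ofList upstream
  have hndS : dS.keys.Nodup := PySem.Dict.nodup_keys_ofList snapshot
  have hpermU : us.Perm dU.items := PySem.List.sorted_perm dU.items (fun p => p.1) false
  have hpermS : ss.Perm dS.items := PySem.List.sorted_perm dS.items (fun p => p.1) false
  have hu : us.Pairwise (fun a b => a.1 < b.1) := pv_sorted_items_strict dU hndU
  have hs : ss.Pairwise (fun a b => a.1 < b.1) := pv_sorted_items_strict dS hndS
  rw [pvMerge_eq us ss hu hs]
  have hfA : (fun p : String × String => !(ss.any fun q => q.1 == p.1))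
      = (fun p : String × String => !(dS.contains p.1)) :=
    funext fun p => by rw [pv_any_eq_contains dS ss hpermS p.1]
  have hfB : (fun p : String × String => !(us.any fun q => q.1 == p.1))
      = (fun p : String × String => !(dU.contains p.1)) :=
    funext fun p => by rw [pv_any_eq_contains dU us hpermU p.1]
  have hfC : (fun p : String × String =>
        match ss.find? (fun q => q.1 == p.1) with
        | some q => if q.2 != p.2 then some (p.1, q.2, p.2) else none
        | none => none)
      = (fun p : String × String =>
        match dS.get? p.1 with
        | some w => if w != p.2 then some (p.1, w, p.2) else none
        | none => none) := by
    funext p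
    rw [pv_find?_eq_get? dS ss hpermS hndS p.1]
    rcases dS.get? p.1 with _ | w <;> simp
  rw [hfA, hfB, hfC]
  have hkey : ∀ (a : String × String) (x : String × String × String), (match dS.get? a.1 with
      | some w => if w != a.2 then some (a.1, w, a.2) else none
      | none => none) = some x → x.1 = a.1 := by
    intro a x h
    rcases hg : dS.get? a.1 with _ | w <;> rw [hg] at h <;> dsimp only at h
    · simp at h
    · by_cases hv : (w != a.2) = true
      · rw [if_pos hv] at h
        rw [← Option.some_inj.mp h]
      · rw [if_neg hv] at h
        simp at h
  refine Prod.ext ?_ (Prod.ext ?_ ?_) <;> dsimp only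
  · exact PySem.List.sorted_eq_of_perm_of_pairwise_lt _ _ _
      (hpermU.filter _) (hu.filter _)
  · exact PySem.List.sorted_eq_of_perm_of_pairwise_lt _ _ _
      (hpermS.filter _) (hs.filter _)
  · refine PySem.List.sorted_eq_of_perm_of_pairwise_lt _ _ _ (hpermU.filterMap _) ?_
    refine List.pairwise_filterMap.mpr (hu.imp ?_)
    intro a b hab x hx y hy
    rw [hkey a x hx, hkey b y hy]
    exact hab
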